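-- pv_equiv track=rewrite | github.com/NiruddeshJatra/DSA-Leetcode_Problems | Hashing/P314 - Making File Names Unique.py | getFolderNames
-- ===== SOURCE A (Python) =====
-- from typing import List
--
-- def getFolderNames(names: List[str]) -> List[str]:
--     usedNames = {}  # Maps names to their highest used suffix
--
--     for originalName in names:
--         modifiedName = originalName
--
--         if modifiedName in usedNames:
--             suffixCount = usedNames[originalName]
--
--             # Try increasing suffixes until finding unused name
--             while modifiedName in usedNames:
--                 suffixCount += 1
--                 modifiedName = f'{originalName}({suffixCount})'
--
--             # Update suffix counter for original name
--             usedNames[originalName] = suffixCount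
--
--         # Mark new name as used with initial suffix 0
--         usedNames[modifiedName] = 0
--
--     return list(usedNames.keys())
-- ===== SOURCE B (Python) =====
-- from typing import List
--
-- def getFolderNames(names: List[str]) -> List[str]:
--     used = set()
--     result = []
--     for name in names:
--         if name not in used:
--             used.add(name)
--             result.append(name)
--         else:
--             k = 1
--             while f'{name}({k})' in used:
--                 k += 1
--             candidate = f'{name}({k})'
--             used.add(candidate)
--             result.append(candidate)
--     return result
-- ===== Notes on version B (the rewrite author's own statement) =====
-- stated objective: simpler
-- what changed: Replaces A's resume-counter dict (whose key insertion order doubles as the output) with an explicit result list plus a set of used names, probing suffixes afresh from 1 for each duplicate.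
import Mathlib
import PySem

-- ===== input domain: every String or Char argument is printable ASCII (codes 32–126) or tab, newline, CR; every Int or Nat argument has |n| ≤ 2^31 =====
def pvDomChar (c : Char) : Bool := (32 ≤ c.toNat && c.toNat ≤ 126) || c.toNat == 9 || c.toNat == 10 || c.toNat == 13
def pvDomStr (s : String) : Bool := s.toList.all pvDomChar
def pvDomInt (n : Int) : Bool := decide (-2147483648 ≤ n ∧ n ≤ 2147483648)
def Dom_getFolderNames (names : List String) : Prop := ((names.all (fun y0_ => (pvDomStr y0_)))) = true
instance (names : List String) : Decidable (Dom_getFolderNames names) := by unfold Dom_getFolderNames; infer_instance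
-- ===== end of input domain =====

-- B replaces A's resume-counter dict (whose key insertion order doubles as the output) with an
-- explicit result list plus a set of used names, probing suffixes afresh from 1 per duplicate (simpler).

-- shared helper: the f-string f'{orig}({c})'
def pvName (orig : String) (c : Int) : String := orig ++ "(" ++ PySem.Int.toStr c ++ ")"

-- ===== PORT A =====
-- A's while loop: state (suffixCount, modifiedName); the fuel only makes the loop total
def pvWhileA (d : PySem.Dict String Int) (orig : String) (c : Int) (m : String) : Nat → Int × String
  | 0 => (c, m)
  | fuel+1 => if d.contains m then pvWhileA d orig (c+1) (pvName orig (c+1)) fuel else (c, m)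

def pvStepA (d : PySem.Dict String Int) (orig : String) : PySem.Dict String Int :=
  if d.contains orig then
    let c0 := d.getD orig 0
    let cm := pvWhileA d orig c0 orig (d.items.length + 1)
    (d.insert orig cm.1).insert cm.2 0
  else
    d.insert orig 0

def getFolderNames (names : List String) : List String :=
  (names.foldl pvStepA PySem.Dict.empty).keys

-- ===== PORT B =====
-- B's while loop: probe k = 1, 2, … until f'{name}({k})' is unused; the fuel only makes the loop total
def pvWhileB (used : PySem.Set String) (nm : String) (k : Int) : Nat → Int
  | 0 => k
  | fuel+1 => if PySem.Set.contains used (pvName nm k) then pvWhileB used nm (k+1) fuel else k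

def pvStepB (st : PySem.Set String × List String) (nm : String) : PySem.Set String × List String :=
  if PySem.Set.contains st.1 nm then
    let k := pvWhileB st.1 nm 1 (st.1.length + 1)
    let candidate := pvName nm k
    (PySem.Set.add st.1 candidate, st.2 ++ [candidate])
  else
    (PySem.Set.add st.1 nm, st.2 ++ [nm])

def getFolderNames_alt (names : List String) : List String :=
  (names.foldl pvStepB (PySem.Set.empty, [])).2

-- ===== PRECONDITION & SPEC =====
def Spec_getFolderNames (names : List String) (out : List String) : Prop := out = getFolderNames_alt names
instance (names : List String) (out : List String) : Decidable (Spec_getFolderNames names out) := by unfold Spec_getFolderNames; infer_instance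

-- ===== CLAIM (what is proved, stated in full; the proofs are below) =====
def Claim_equal_getFolderNames : Prop := ∀ (names : List String), Dom_getFolderNames names → Spec_getFolderNames names (getFolderNames names)

-- ===== LEMMAS AND PROOFS =====

theorem pv_digitChar_val (d : Nat) (h : d < 10) : (Nat.digitChar d).toNat = 48 + d := by
  interval_cases d <;> rfl

theorem pv_toDigits_val (n : Nat) : ∀ acc : Nat,
    (Nat.toDigits 10 n).foldl (fun a c => 10 * a + (c.toNat - 48)) acc
      = acc * 10 ^ (Nat.toDigits 10 n).length + n := by
  induction n using Nat.strong_induction_on with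
  | _ n ih =>
    intro acc
    by_cases hn : n < 10
    · rw [Nat.toDigits_of_lt_base hn]
      simp [List.foldl, pv_digitChar_val n hn]
      omega
    · rw [Nat.toDigits_of_base_le (by norm_num) (le_of_not_gt hn)]
      rw [List.foldl_append]
      rw [ih (n / 10) (Nat.div_lt_self (by omega) (by norm_num)) acc]
      simp [List.foldl, pv_digitChar_val (n % 10) (Nat.mod_lt _ (by norm_num))]
      rw [pow_succ]
      have := Nat.div_add_mod n 10
      ring_nf
      omega

theorem pv_toDigits_inj (m n : Nat) (h : Nat.toDigits 10 m = Nat.toDigits 10 n) : m = n := by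
  have h1 := pv_toDigits_val m 0
  rw [h, pv_toDigits_val n 0] at h1
  simpa using h1.symm

theorem pv_toChars_inj (i j : Int) (h : PySem.Int.toChars i = PySem.Int.toChars j) : i = j := by
  have hdig : ∀ m : Nat, '-' ∉ Nat.toDigits 10 m := by
    intro k hm
    have := Nat.isDigit_of_mem_toDigits (b := 10) (by norm_num) (by norm_num) hm
    simp [Char.isDigit] at this
  unfold PySem.Int.toChars at h
  split_ifs at h with hi hj hj
  · have := pv_toDigits_inj i.natAbs j.natAbs (by simpa using h)
    omega
  · exfalso
    exact hdig _ (h ▸ List.mem_cons_self)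
  · exfalso
    exact hdig _ (h.symm ▸ List.mem_cons_self)
  · have := pv_toDigits_inj i.toNat j.toNat h
    omega


theorem pvName_toList (orig : String) (c : Int) :
    (pvName orig c).toList = orig.toList ++ '(' :: (PySem.Int.toChars c ++ [')']) := by
  simp [pvName, String.toList_append, PySem.Int.toList_toStr]

theorem pvName_inj (orig : String) (i j : Int) (h : pvName orig i = pvName orig j) : i = j := by
  have h2 := congrArg String.toList h
  rw [pvName_toList, pvName_toList] at h2
  have h3 := List.append_cancel_left h2
  rw [List.cons.injEq] at h3
  exact pv_toChars_inj _ _ (List.append_cancel_right h3.2)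

theorem pvName_ne_self (orig : String) (i : Int) : pvName orig i ≠ orig := by
  intro h
  have h2 := congrArg String.toList h
  rw [pvName_toList] at h2
  have := congrArg List.length h2
  simp at this

theorem pv_whileA_eq (d : PySem.Dict String Int) (nm : String) (t : Nat) :
    ∀ (fuel : Nat) (c : Int), t < fuel →
    pvName nm (c + t) ∉ d.keys →
    (∀ s : Nat, s < t → pvName nm (c + s) ∈ d.keys) →
    pvWhileA d nm c (pvName nm c) fuel = (c + t, pvName nm (c + t)) := by
  induction t with
  | zero =>
    intro fuel c ht hfree _
    obtain ⟨f, rfl⟩ := Nat.exists_eq_succ_of_ne_zero (by omega : fuel ≠ 0)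
    simp only [pvWhileA]
    rw [PySem.Dict.contains_eq_decide_mem_keys]
    simp only [Int.natCast_zero, add_zero] at hfree ⊢
    simp [hfree]
  | succ t ih =>
    intro fuel c ht hfree hused
    obtain ⟨f, rfl⟩ := Nat.exists_eq_succ_of_ne_zero (by omega : fuel ≠ 0)
    simp only [pvWhileA]
    rw [PySem.Dict.contains_eq_decide_mem_keys]
    have h0 : pvName nm c ∈ d.keys := by simpa using hused 0 (by omega)
    simp only [h0, decide_true, if_true]
    have hca : c + 1 + (t : Int) = c + ((t : Nat) + 1 : Nat) := by push_cast; ring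
    rw [ih f (c+1) (by omega) (by rw [hca]; exact hfree)
      (fun s hs => by
        have : c + 1 + (s : Int) = c + ((s : Nat) + 1 : Nat) := by push_cast; ring
        rw [this]; exact hused (s+1) (by omega))]
    rw [hca]

theorem pv_whileB_eq (u : PySem.Set String) (nm : String) (t : Nat) :
    ∀ (fuel : Nat) (k : Int), t < fuel →
    pvName nm (k + t) ∉ u →
    (∀ s : Nat, s < t → pvName nm (k + s) ∈ u) →
    pvWhileB u nm k fuel = k + t := by
  induction t with
  | zero =>
    intro fuel k ht hfree _
    obtain ⟨f, rfl⟩ := Nat.exists_eq_succ_of_ne_zero (by omega : fuel ≠ 0)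
    simp only [pvWhileB]
    simp only [Int.natCast_zero, add_zero] at hfree ⊢
    simp [hfree]
  | succ t ih =>
    intro fuel k ht hfree hused
    obtain ⟨f, rfl⟩ := Nat.exists_eq_succ_of_ne_zero (by omega : fuel ≠ 0)
    simp only [pvWhileB]
    have h0 : u.contains (pvName nm k) = true := by
      rw [PySem.Set.contains_iff]; simpa using hused 0 (by omega)
    simp only [h0, if_true]
    have hca : k + 1 + (t : Int) = k + ((t : Nat) + 1 : Nat) := by push_cast; ring
    rw [ih f (k+1) (by omega) (by rw [hca]; exact hfree)
      (fun s hs => by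
        have : k + 1 + (s : Int) = k + ((s : Nat) + 1 : Nat) := by push_cast; ring
        rw [this]; exact hused (s+1) (by omega))]
    rw [hca]

theorem pv_nodup_le (l l' : List String) (h : l.Nodup) (hs : l ⊆ l') : l.length ≤ l'.length := by
  calc l.length = l.toFinset.card := (List.toFinset_card_of_nodup h).symm
  _ ≤ l'.toFinset.card := Finset.card_le_card (by intro x hx; simp only [List.mem_toFinset] at *; exact hs hx)
  _ ≤ l'.length := l'.toFinset_card_le

theorem pv_count (keys : List String) (nm : String) (hmem : nm ∈ keys) (m : Nat)
    (h : ∀ s : Nat, s < m → pvName nm (1 + s) ∈ keys) : m + 1 ≤ keys.length := by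
  have := pv_nodup_le ((List.range m).map (fun s : Nat => pvName nm (1 + (s : Int))) ++ [nm]) keys ?_ ?_
  · simpa using this
  · rw [List.nodup_append]
    refine ⟨?_, List.nodup_singleton _, ?_⟩
    · refine List.Nodup.map_on ?_ (List.nodup_range (n := m))
      intro a _ b _ hab
      have := pvName_inj nm _ _ hab
      omega
    · intro x hx
      simp only [List.mem_map, List.mem_range] at hx
      obtain ⟨s, _, rfl⟩ := hx
      simp [pvName_ne_self nm _]
  · intro x hx
    simp only [List.mem_append, List.mem_map, List.mem_range, List.mem_singleton] at hx
    rcases hx with ⟨s, hs, rfl⟩ | rfl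
    · exact h s hs
    · exact hmem

def pvInv (d : PySem.Dict String Int) (st : PySem.Set String × List String) : Prop :=
  st.1 = d.keys ∧ st.2 = d.keys ∧ d.keys.Nodup ∧
  (∀ nm c, d.get? nm = some c → 0 ≤ c ∧
    ∀ k : Int, 1 ≤ k → k ≤ c → pvName nm k ∈ d.keys)

theorem pv_step (d : PySem.Dict String Int) (st : PySem.Set String × List String)
    (h : pvInv d st) (nm : String) : pvInv (pvStepA d nm) (pvStepB st nm) := by
  obtain ⟨hu, hr, hnd, hinv⟩ := h
  by_cases hc : d.contains nm = true
  · -- collision case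
    have hmem : nm ∈ d.keys := (PySem.Dict.contains_iff_mem_keys d nm).mp hc
    obtain ⟨c0, hc0⟩ : ∃ c0, d.get? nm = some c0 := by
      rw [PySem.Dict.contains_eq_isSome_get?] at hc
      exact Option.isSome_iff_exists.mp hc
    have hgetD : d.getD nm 0 = c0 := by rw [PySem.Dict.getD_eq_get?_getD, hc0]; rfl
    obtain ⟨hc0nn, hbelow⟩ := hinv nm c0 hc0
    -- length facts
    have hlen : d.items.length = d.keys.length := by simp [PySem.Dict.keys]
    -- first free offset
    have hex : ∃ t : Nat, pvName nm (c0 + 1 + t) ∉ d.keys := by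
      by_contra hall
      have hall : ∀ t : Nat, pvName nm (c0 + 1 + t) ∈ d.keys :=
        fun t => not_not.mp (fun hn => hall ⟨t, hn⟩)
      have := pv_count d.keys nm hmem (c0.toNat + d.keys.length) (fun s hs => by
        by_cases hs' : (s : Int) < c0
        · exact hbelow (1 + s) (by omega) (by omega)
        · have : (1 : Int) + s = c0 + 1 + ((s - c0.toNat : Nat) : Int) := by omega
          rw [this]; exact hall _)
      omega
    set t := Nat.find hex with ht
    have hfree : pvName nm (c0 + 1 + t) ∉ d.keys := Nat.find_spec hex
    have hmin : ∀ s : Nat, s < t → pvName nm (c0 + 1 + s) ∈ d.keys := by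
      intro s hs
      have := Nat.find_min hex hs
      simpa using this
    have hbound : c0.toNat + t + 1 ≤ d.keys.length := by
      apply pv_count d.keys nm hmem
      intro s hs
      by_cases hs' : (s : Int) < c0
      · exact hbelow (1 + s) (by omega) (by omega)
      · have : (1 : Int) + s = c0 + 1 + ((s - c0.toNat : Nat) : Int) := by omega
        rw [this]; exact hmin _ (by omega)
    -- evaluate A's while loop
    have hA : pvWhileA d nm c0 nm (d.items.length + 1) = (c0 + 1 + t, pvName nm (c0 + 1 + t)) := by
      obtain ⟨L, hL⟩ : ∃ L, d.items.length = L + 1 := by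
        refine ⟨d.items.length - 1, ?_⟩
        have : 0 < d.keys.length := List.length_pos_of_mem hmem
        omega
      rw [hL]
      simp only [pvWhileA]
      rw [PySem.Dict.contains_eq_decide_mem_keys]
      simp only [hmem, decide_true, if_true]
      have := pv_whileA_eq d nm t (L + 1) (c0 + 1) (by omega)
        (by convert hfree using 3)
        (fun s hs => by convert hmin s hs using 3)
      convert this using 2
    -- evaluate B's while loop
    have hB : pvWhileB st.1 nm 1 (st.1.length + 1) = c0 + 1 + t := by
      have := pv_whileB_eq st.1 nm (c0.toNat + t) (st.1.length + 1) 1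
        (by rw [hu]; omega)
        (by rw [hu]; convert hfree using 3; push_cast; omega)
        (fun s hs => by
          rw [hu]
          by_cases hs' : (s : Int) < c0
          · exact hbelow (1 + s) (by omega) (by omega)
          · have : (1 : Int) + s = c0 + 1 + ((s - c0.toNat : Nat) : Int) := by omega
            rw [this]; exact hmin _ (by omega))
      rw [this]; push_cast; omega
    -- the new assigned name
    have hBc : PySem.Set.contains st.1 nm = true := by
      rw [PySem.Set.contains_iff, hu]; exact hmem
    have hAd : pvStepA d nm = (d.insert nm (c0 + 1 + t)).insert (pvName nm (c0 + 1 + t)) 0 := by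
      simp only [pvStepA, hc, if_true, hgetD, hA]
    have hBs : pvStepB st nm =
        (PySem.Set.add st.1 (pvName nm (c0 + 1 + t)), st.2 ++ [pvName nm (c0 + 1 + t)]) := by
      simp only [pvStepB, hBc, if_true, hB]
    rw [hAd, hBs]
    -- keys of the new dict
    have hk1 : (d.insert nm (c0 + 1 + t)).keys = d.keys :=
      PySem.Dict.keys_insert_of_contains _ _ hc
    have hc2 : (d.insert nm (c0 + 1 + t)).contains (pvName nm (c0 + 1 + t)) = false := by
      rw [← Bool.not_eq_true, PySem.Dict.contains_iff_mem_keys, hk1]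
      exact hfree
    have hk2 : ((d.insert nm (c0 + 1 + t)).insert (pvName nm (c0 + 1 + t)) 0).keys
        = d.keys ++ [pvName nm (c0 + 1 + t)] := by
      rw [PySem.Dict.keys_insert_of_not_contains _ _ hc2, hk1]
    refine ⟨?_, ?_, ?_, ?_⟩
    · show PySem.Set.add st.1 (pvName nm (c0 + 1 + t)) = _
      rw [hk2, PySem.Set.add, hu]
      simp [hfree]
    · show st.2 ++ _ = _
      rw [hk2, hr]
    · rw [hk2]
      exact List.Nodup.append hnd (List.nodup_singleton _) (by simpa using hfree)
    · intro nm' c' hget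
      rw [PySem.Dict.get?_insert] at hget
      split_ifs at hget with h1
      · -- nm' = the new candidate
        cases hget
        exact ⟨le_refl 0, fun k hk1' hk2' => by omega⟩
      · rw [PySem.Dict.get?_insert] at hget
        split_ifs at hget with h2
        · -- nm' = nm
          cases hget
          subst h2
          refine ⟨by omega, fun k hk1' hk2' => ?_⟩
          rw [hk2]
          by_cases hkc : k ≤ c0
          · exact List.mem_append_left _ (hbelow k hk1' hkc)
          · by_cases hke : k = c0 + 1 + t
            · subst hke; exact List.mem_append_right _ (by simp)
            · have : k = c0 + 1 + ((k - c0 - 1).toNat : Int) := by omega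
              rw [this]
              exact List.mem_append_left _ (hmin _ (by omega))
        · obtain ⟨hnn, hall⟩ := hinv nm' c' hget
          exact ⟨hnn, fun k hk1' hk2' => by
            rw [hk2]; exact List.mem_append_left _ (hall k hk1' hk2')⟩
  · -- new name case
    have hmem : nm ∉ d.keys := by
      rw [← PySem.Dict.contains_iff_mem_keys]; simp [hc]
    have hBc : PySem.Set.contains st.1 nm = false := by
      rw [← Bool.not_eq_true, PySem.Set.contains_iff, hu]; exact hmem
    have hAd : pvStepA d nm = d.insert nm 0 := by
      simp only [pvStepA]
      rw [if_neg (by simp [hc])]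
    have hBs : pvStepB st nm = (PySem.Set.add st.1 nm, st.2 ++ [nm]) := by
      simp only [pvStepB]
      rw [if_neg (by simp only [PySem.Set.contains_iff, hu]; exact hmem)]
    rw [hAd, hBs]
    have hk : (d.insert nm 0).keys = d.keys ++ [nm] := by
      rw [PySem.Dict.keys_insert_of_not_contains]
      simpa using hc
    refine ⟨?_, ?_, ?_, ?_⟩
    · show PySem.Set.add st.1 nm = _
      rw [hk, PySem.Set.add, hu]
      simp [hmem]
    · show st.2 ++ [nm] = _
      rw [hk, hr]
    · rw [hk]
      exact List.Nodup.append hnd (List.nodup_singleton _) (by simpa using hmem)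
    · intro nm' c' hget
      rw [PySem.Dict.get?_insert] at hget
      split_ifs at hget with h1
      · cases hget
        exact ⟨le_refl 0, fun k hk1' hk2' => by omega⟩
      · obtain ⟨hnn, hall⟩ := hinv nm' c' hget
        exact ⟨hnn, fun k hk1' hk2' => by
          rw [hk]; exact List.mem_append_left _ (hall k hk1' hk2')⟩

theorem pv_fold (names : List String) (d : PySem.Dict String Int)
    (st : PySem.Set String × List String) (h : pvInv d st) :
    pvInv (names.foldl pvStepA d) (names.foldl pvStepB st) := by
  induction names generalizing d st with
  | nil => exact h
  | cons x xs ih => exact ih _ _ (pv_step _ _ h x)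

-- ===== VERDICT (by name: the statement is the Claim_ definition above) =====
theorem getFolderNames_spec : Claim_equal_getFolderNames := by
  intro names _
  unfold Spec_getFolderNames getFolderNames getFolderNames_alt
  have h := pv_fold names PySem.Dict.empty (PySem.Set.empty, [])
    (by refine ⟨rfl, rfl, ?_, ?_⟩ <;> simp [PySem.Dict.empty, PySem.Dict.keys, PySem.Dict.get?])
  exact h.2.1.symm
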